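-- pv_equiv track=rewrite | github.com/nadrojisk/Auburn-Class-Projects | gpac-assignments/2b/source/solver.py | _select_best_move
-- ===== SOURCE A (Python) =====
-- def _select_best_move(move_scores):
--     """ Selects best move out of selection of different scores each correlating to a move
--     direction.
--
--     move_scores - dictionary with keys of move direction and values of scores
--     relating to the move
--     """
--
--     max_score = max(move_scores.values())
--     pacman_move = None
--     for move_direction in move_scores.keys():
--         if move_scores[move_direction] == max_score:
--             pacman_move = move_direction
--             break
--     return pacman_move
-- ===== SOURCE B (Python) =====
-- def _select_best_move(move_scores):
--     """Stable-sort the items once, highest score first, and return the head's key.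
--     Stability makes the head the earliest-inserted key with the maximal score."""
--     return sorted(move_scores.items(), key=lambda item: item[1], reverse=True)[0][0]
-- ===== Notes on version B (the rewrite author's own statement) =====
-- stated objective: alternative
-- what changed: Replaced A's max-over-values followed by a key scan with a sort-based argmax: stable-sort the items by score descending and take the head's key (stability gives the same first-maximal tie-breaking).
import Mathlib
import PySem

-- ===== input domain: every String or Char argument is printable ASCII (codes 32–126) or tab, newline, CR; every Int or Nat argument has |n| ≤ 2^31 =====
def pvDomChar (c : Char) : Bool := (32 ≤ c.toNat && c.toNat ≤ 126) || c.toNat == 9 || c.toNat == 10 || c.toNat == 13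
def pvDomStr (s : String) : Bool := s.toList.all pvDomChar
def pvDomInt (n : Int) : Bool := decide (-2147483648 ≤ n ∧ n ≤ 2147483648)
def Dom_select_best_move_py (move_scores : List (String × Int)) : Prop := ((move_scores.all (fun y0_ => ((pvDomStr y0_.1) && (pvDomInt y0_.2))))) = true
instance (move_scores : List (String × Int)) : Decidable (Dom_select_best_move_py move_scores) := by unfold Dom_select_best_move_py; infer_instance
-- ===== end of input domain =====

-- B replaces A's max-then-scan with a sort-based argmax: stable-sort the items by score descending and take the head's key (stability preserves A's first-maximal tie-breaking); an alternative algorithm of similar cost.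


-- ===== PORT A =====
-- the for-loop with break: first key whose score equals maxScore (pacman_move stays none if no key matches)
def selBestLoop (d : PySem.Dict String Int) (maxScore : Int) : List String → Option String
  | [] => none
  | k :: rest => if d.getD k 0 = maxScore then some k else selBestLoop d maxScore rest

def select_best_move_py (move_scores : List (String × Int)) : Option String :=
  let d := PySem.Dict.ofList move_scores
  match PySem.List.max? d.values (fun v => v) with
  | none => none   -- max() of an empty sequence raises ValueError; excluded by Pre_
  | some maxScore => selBestLoop d maxScore d.keys

-- ===== PORT B =====
-- sorted(move_scores.items(), key=lambda item: item[1], reverse=True)[0][0]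
def select_best_move_py_alt (move_scores : List (String × Int)) : Option String :=
  let d := PySem.Dict.ofList move_scores
  match PySem.List.sorted d.items (fun item => item.2) true with
  | [] => none   -- [0] of an empty list raises IndexError; excluded by Pre_
  | item :: _ => some item.1

-- ===== PRECONDITION & SPEC =====
-- Pre_ excludes only the empty dict, on which A raises ValueError (max of empty) and B raises IndexError.
def Pre_select_best_move_py (move_scores : List (String × Int)) : Prop := move_scores ≠ []
instance (move_scores : List (String × Int)) : Decidable (Pre_select_best_move_py move_scores) := by unfold Pre_select_best_move_py; infer_instance
def pvWitness_select_best_move_py : (List (String × Int)) := [("up", 3), ("down", 3), ("left", 1)]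

def Spec_select_best_move_py (move_scores : List (String × Int)) (out : Option String) : Prop := out = select_best_move_py_alt move_scores
instance (move_scores : List (String × Int)) (out : Option String) : Decidable (Spec_select_best_move_py move_scores out) := by unfold Spec_select_best_move_py; infer_instance

-- ===== CLAIM (what is proved, stated in full; the proofs are below) =====
def Claim_equal_select_best_move_py : Prop := ∀ (move_scores : List (String × Int)), Dom_select_best_move_py move_scores → Pre_select_best_move_py move_scores → Spec_select_best_move_py move_scores (select_best_move_py move_scores)

-- ===== LEMMAS AND PROOFS =====

-- generic "first key achieving score m" scan (selBestLoop with the lookup abstracted to f)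
def firstWith {α : Type} (f : α → Int) (m : Int) : List α → Option α
  | [] => none
  | k :: rest => if f k = m then some k else firstWith f m rest

theorem firstWith_cons {α : Type} (f : α → Int) (m : Int) (k : α) (rest : List α) :
    firstWith f m (k :: rest) = if f k = m then some k else firstWith f m rest := rfl

theorem selBestLoop_eq_firstWith (d : PySem.Dict String Int) (m : Int) (ks : List String) :
    selBestLoop d m ks = firstWith (fun k => d.getD k 0) m ks := by
  induction ks with
  | nil => rfl
  | cons k rest ih => simp only [selBestLoop, firstWith_cons, ih]

-- the running-argmax step ("keep the earlier element on ties")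
def amStep {α : Type} (f : α → Int) (b x : α) : α := if f b < f x then x else b

-- Python's max-with-key on a nonempty list IS the running-argmax fold
theorem max?_cons_eq_foldl {α : Type} (f : α → Int) (a : α) (t : List α) :
    PySem.List.max? (a :: t) f = some (t.foldl (amStep f) a) := by
  simp only [PySem.List.max?, List.foldl_cons]
  induction t generalizing a with
  | nil => rfl
  | cons x t ih => simp only [List.foldl_cons, amStep]; split_ifs <;> exact ih _

-- one step of Python's max with a key: the accumulator keeps the earlier element on ties
theorem max?_cons_cons {α : Type} (f : α → Int) (a x : α) (t : List α) :
    PySem.List.max? (a :: x :: t) f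
      = if f a < f x then PySem.List.max? (x :: t) f else PySem.List.max? (a :: t) f := by
  simp only [PySem.List.max?, List.foldl_cons]
  split_ifs with h <;> rfl

-- B's running argmax computes "first element attaining the running maximum of f"
theorem max?_eq_firstWith {α : Type} (f : α → Int) (t : List α) (a : α) :
    PySem.List.max? (a :: t) f = firstWith f ((t.map f).foldl max (f a)) (a :: t) := by
  induction t generalizing a with
  | nil => simp [PySem.List.max?, firstWith]
  | cons x t ih =>
    rw [max?_cons_cons]
    by_cases h : f a < f x
    · have hfx : f x ≤ (t.map f).foldl max (f x) := (PySem.List.le_foldl_max _ _).1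
      have hmax : max (f a) (f x) = f x := by omega
      rw [if_pos h, ih x, List.map_cons, List.foldl_cons, hmax,
        firstWith_cons (k := a), if_neg (by omega : ¬ f a = (t.map f).foldl max (f x))]
    · have hfa : f a ≤ (t.map f).foldl max (f a) := (PySem.List.le_foldl_max _ _).1
      have hfx : f x ≤ f a := by omega
      have hmax : (t.map f).foldl max (max (f a) (f x)) = (t.map f).foldl max (f a) := by
        rw [List.foldl_assoc (op := max), ← List.foldl_assoc (op := max),
          show max (f a) (f x) = f a by omega]
      rw [if_neg h, ih a, List.map_cons, List.foldl_cons, hmax]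
      by_cases ha : f a = (t.map f).foldl max (f a)
      · rw [firstWith_cons (k := a), firstWith_cons (k := a), if_pos ha, if_pos ha]
      · have hx : ¬ f x = (t.map f).foldl max (f a) := by omega
        rw [firstWith_cons (k := a), firstWith_cons (k := a), if_neg ha, if_neg ha,
          firstWith_cons, if_neg hx]

-- A's two-phase computation equals the single-pass argmax, over any list
theorem two_phase_eq_argmax {α : Type} (f : α → Int) (ks : List α) :
    (match PySem.List.max? (ks.map f) (fun v => v) with
      | none => none
      | some m => firstWith f m ks) = PySem.List.max? ks f := by
  cases ks with
  | nil => rfl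
  | cons k t =>
    rw [show (k :: t).map f = f k :: t.map f from rfl, PySem.List.max?_id_cons]
    exact (max?_eq_firstWith f t k).symm

-- head of a reverse-order stable insertion: x takes the head iff it is strictly better
theorem insertBy_rev_head {α : Type} (key : α → Int) (x h : α) (r : List α) :
    PySem.List.insertBy (fun a b => decide (key b < key a)) x (h :: r)
      = amStep key h x :: (if key h < key x then h :: r
          else (PySem.List.insertBy (fun a b => decide (key b < key a)) x r)) := by
  simp only [PySem.List.insertBy, amStep]
  split_ifs with h1 h2 h2 <;> simp_all

-- folding stable reverse insertions keeps the running argmax at the head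
theorem foldl_insertBy_rev_head {α : Type} (key : α → Int) (l : List α) :
    ∀ (h : α) (r : List α), ∃ r',
      l.foldl (fun acc x => PySem.List.insertBy (fun a b => decide (key b < key a)) x acc) (h :: r)
        = l.foldl (amStep key) h :: r' := by
  induction l with
  | nil => exact fun h r => ⟨r, rfl⟩
  | cons x l ih =>
    intro h r
    rw [List.foldl_cons, List.foldl_cons, insertBy_rev_head]
    exact ih (amStep key h x) _

-- head of the stable descending sort = Python's max-with-key (first maximal element)
theorem head_sorted_rev_eq_max? {α : Type} (key : α → Int) (xs : List α) :
    (match PySem.List.sorted xs key true with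
      | [] => (none : Option α)
      | m :: _ => some m) = PySem.List.max? xs key := by
  cases xs with
  | nil => rfl
  | cons a t =>
    rw [PySem.List.sorted_rev_eq_foldl_insertBy, List.foldl_cons,
      show PySem.List.insertBy (fun a b => decide (key b < key a)) a [] = [a] from rfl]
    obtain ⟨r', hr'⟩ := foldl_insertBy_rev_head key t a []
    rw [hr', max?_cons_eq_foldl]

-- max-with-key commutes with map when the key factors through the map
theorem max?_map {α β : Type} (g : α → β) (f : β → Int) (l : List α) :
    PySem.List.max? (l.map g) f = (PySem.List.max? l (fun x => f (g x))).map g := by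
  cases l with
  | nil => rfl
  | cons a t =>
    rw [List.map_cons, max?_cons_eq_foldl, max?_cons_eq_foldl, Option.map_some, List.foldl_map]
    congr 1
    induction t generalizing a with
    | nil => rfl
    | cons x t ih => simp only [List.foldl_cons, amStep]; split_ifs <;> exact ih _

-- ===== VERDICT (by name: the statement is the Claim_ definition above) =====
theorem select_best_move_py_spec : Claim_equal_select_best_move_py := by
  intro ms _ _
  show (match PySem.List.max? (PySem.Dict.ofList ms).values (fun v => v) with
    | none => none
    | some m => selBestLoop (PySem.Dict.ofList ms) m (PySem.Dict.ofList ms).keys)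
      = (match PySem.List.sorted (PySem.Dict.ofList ms).items (fun item => item.2) true with
          | [] => none
          | item :: _ => some item.1)
  set d := PySem.Dict.ofList ms with hd
  have hnd : d.keys.Nodup := PySem.Dict.nodup_keys_ofList ms
  -- A side: two-phase max-then-scan = argmax over the keys
  rw [PySem.Dict.values_eq_map_keys d hnd 0]
  simp only [selBestLoop_eq_firstWith]
  rw [two_phase_eq_argmax (fun k => d.getD k 0) d.keys]
  -- B side: head of stable descending sort of items = argmax over items, = mapped argmax over keys
  have h := head_sorted_rev_eq_max? (fun item : String × Int => item.2) d.items
  rw [PySem.Dict.items_eq_map_keys d hnd 0,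
      max?_map (fun k => (k, d.getD k 0)) (fun item => item.2) d.keys] at h
  rw [PySem.Dict.items_eq_map_keys d hnd 0]
  cases hs : PySem.List.sorted (d.keys.map fun k => (k, d.getD k 0)) (fun item => item.2) true <;>
    rw [hs] at h <;>
    cases hm : PySem.List.max? d.keys (fun k => d.getD k 0) <;>
    rw [hm] at h <;> simp_all
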